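-- pv_equiv track=rewrite | github.com/greshko/naibbe-cipher | naibbe-python/voynichesque.py | parse_into_glyphs
-- ===== SOURCE A (Python) =====
-- from typing import List, Tuple, Dict, Any, Optional
--
-- GLYPH_CLUSTERS = ["cfh", "ckh", "cph", "cth", "sh", "ch"]  # longest-first
--
-- def parse_into_glyphs(text: str) -> List[str]:
--     glyphs: List[str] = []
--     i = 0
--     n = len(text)
--     while i < n:
--         for cluster in GLYPH_CLUSTERS:
--             if text.startswith(cluster, i):
--                 glyphs.append(cluster)
--                 i += len(cluster)
--                 break
--         else:
--             glyphs.append(text[i])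
--             i += 1
--     return glyphs
-- ===== SOURCE B (Python) =====
-- from typing import List
--
-- def parse_into_glyphs(text: str) -> List[str]:
--     # Character-level decision tree: look at the current char (and at most the
--     # next two) directly instead of trying each cluster with startswith.
--     glyphs: List[str] = []
--     i, n = 0, len(text)
--     while i < n:
--         c = text[i]
--         if c == 'c' and i + 2 < n and text[i + 2] == 'h' and text[i + 1] in ('f', 'k', 'p', 't'):
--             glyphs.append(text[i:i + 3])
--             i += 3
--         elif (c == 's' or c == 'c') and i + 1 < n and text[i + 1] == 'h':
--             glyphs.append(c + 'h')
--             i += 2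
--         else:
--             glyphs.append(c)
--             i += 1
--     return glyphs
-- ===== Notes on version B (the rewrite author's own statement) =====
-- stated objective: alternative
-- what changed: Replaces the per-position trial of each cluster via startswith over the GLYPH_CLUSTERS table by a direct character-level decision tree that inspects at most the next three characters.
import Mathlib
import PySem

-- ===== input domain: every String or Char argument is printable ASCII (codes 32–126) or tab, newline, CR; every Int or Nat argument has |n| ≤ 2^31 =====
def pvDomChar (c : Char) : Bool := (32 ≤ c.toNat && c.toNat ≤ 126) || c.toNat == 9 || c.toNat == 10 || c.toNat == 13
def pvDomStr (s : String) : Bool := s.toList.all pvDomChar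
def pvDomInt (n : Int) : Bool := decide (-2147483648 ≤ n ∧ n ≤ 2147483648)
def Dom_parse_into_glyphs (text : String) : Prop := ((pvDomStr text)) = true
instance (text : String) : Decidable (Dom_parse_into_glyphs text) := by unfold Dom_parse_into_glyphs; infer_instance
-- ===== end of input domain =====

-- B replaces A's per-position scan over the cluster table (startswith for each cluster in turn)
-- by a direct character-level decision tree on at most the next three characters (alternative decomposition).

-- ===== PORT A =====
-- GLYPH_CLUSTERS of A, longest-first, as lists of characters
def pvClusters : List (List Char) :=
  [['c','f','h'], ['c','k','h'], ['c','p','h'], ['c','t','h'], ['s','h'], ['c','h']]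

-- A's while-loop over the remaining suffix of the text; the for/else over GLYPH_CLUSTERS
-- with text.startswith(cluster, i) is List.find? with List.isPrefixOf on the remaining
-- characters (exact: startswith at position i = isPrefixOf of the drop-i suffix); A's
-- 'i += len(cluster)' drops len(cluster) chars, written as dropping len-1 of the tail
-- for structural termination (exact: every cluster in GLYPH_CLUSTERS is nonempty)
def pvAGo (cs : List Char) : List String :=
  match cs with
  | [] => []
  | c :: rest =>
    match pvClusters.find? (fun cl => cl.isPrefixOf (c :: rest)) with
    | some cl => String.ofList cl :: pvAGo (rest.drop (cl.length - 1))
    | none => String.ofList [c] :: pvAGo rest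
termination_by cs.length
decreasing_by
  all_goals simp

def parse_into_glyphs (text : String) : List String := pvAGo text.toList

-- ===== PORT B =====
-- Source B's while-loop as a decision tree on the current char and at most the next two
def pvBGo (cs : List Char) : List String :=
  match cs with
  | [] => []
  | c :: rest =>
    match rest with
    | x :: y :: rest2 =>
      if c = 'c' ∧ y = 'h' ∧ (x = 'f' ∨ x = 'k' ∨ x = 'p' ∨ x = 't') then
        String.ofList [c, x, y] :: pvBGo rest2
      else if (c = 's' ∨ c = 'c') ∧ x = 'h' then
        String.ofList [c, 'h'] :: pvBGo (y :: rest2)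
      else
        String.ofList [c] :: pvBGo (x :: y :: rest2)
    | [x] =>
      if (c = 's' ∨ c = 'c') ∧ x = 'h' then
        String.ofList [c, 'h'] :: pvBGo ([] : List Char)
      else
        String.ofList [c] :: pvBGo [x]
    | [] => String.ofList [c] :: pvBGo ([] : List Char)

def parse_into_glyphs_alt (text : String) : List String := pvBGo text.toList

-- ===== PRECONDITION & SPEC =====
def Spec_parse_into_glyphs (text : String) (out : List String) : Prop := out = parse_into_glyphs_alt text
instance (text : String) (out : List String) : Decidable (Spec_parse_into_glyphs text out) := by unfold Spec_parse_into_glyphs; infer_instance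

-- ===== CLAIM (what is proved, stated in full; the proofs are below) =====
def Claim_equal_parse_into_glyphs : Prop := ∀ (text : String), Dom_parse_into_glyphs text → Spec_parse_into_glyphs text (parse_into_glyphs text)

-- ===== LEMMAS AND PROOFS =====
theorem pvAGo_cons (c : Char) (rest : List Char) :
    pvAGo (c :: rest) =
      match pvClusters.find? (fun cl => cl.isPrefixOf (c :: rest)) with
      | some cl => String.ofList cl :: pvAGo (rest.drop (cl.length - 1))
      | none => String.ofList [c] :: pvAGo rest := by
  rw [pvAGo]

theorem beqF {a b : Char} (h : ¬ b = a) : (a == b) = false := by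
  simp only [beq_eq_false_iff_ne]; exact fun h' => h h'.symm

theorem go_eq : (cs : List Char) → pvAGo cs = pvBGo cs
  | [] => by simp [pvAGo, pvBGo]
  | [c] => by
      have hf : pvClusters.find? (fun cl => cl.isPrefixOf [c]) = none := by
        simp [pvClusters, List.isPrefixOf]
      rw [pvAGo_cons, hf]
      simp [pvBGo, pvAGo]
  | [c, x] => by
      have h1 : pvAGo [x] = [String.ofList [x]] := by
        have hf1 : pvClusters.find? (fun cl => cl.isPrefixOf [x]) = none := by
          simp [pvClusters, List.isPrefixOf]
        rw [pvAGo_cons, hf1]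
        simp [pvAGo]
      by_cases hc : c = 'c'
      · subst hc
        by_cases hx : x = 'h'
        · subst hx
          have hf : pvClusters.find? (fun cl => cl.isPrefixOf ['c', 'h']) = some ['c', 'h'] := by
            simp [pvClusters, List.isPrefixOf]
          rw [pvAGo_cons, hf]
          simp [pvBGo, pvAGo]
        · have hf : pvClusters.find? (fun cl => cl.isPrefixOf ['c', x]) = none := by
            simp [pvClusters, List.isPrefixOf, beqF hx]
          rw [pvAGo_cons, hf]
          simp [pvBGo, hx, h1]
      · by_cases hs : c = 's'
        · subst hs
          by_cases hx : x = 'h'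
          · subst hx
            have hf : pvClusters.find? (fun cl => cl.isPrefixOf ['s', 'h']) = some ['s', 'h'] := by
              simp [pvClusters, List.isPrefixOf]
            rw [pvAGo_cons, hf]
            simp [pvBGo, pvAGo]
          · have hf : pvClusters.find? (fun cl => cl.isPrefixOf ['s', x]) = none := by
              simp [pvClusters, List.isPrefixOf, beqF hx]
            rw [pvAGo_cons, hf]
            simp [pvBGo, hx, h1]
        · have hf : pvClusters.find? (fun cl => cl.isPrefixOf [c, x]) = none := by
            simp [pvClusters, List.isPrefixOf, beqF hc, beqF hs]
          rw [pvAGo_cons, hf]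
          simp [pvBGo, hc, hs, h1]
  | c :: x :: y :: rest => by
      have ih1 := go_eq (x :: y :: rest)
      have ih2 := go_eq (y :: rest)
      have ih3 := go_eq rest
      by_cases hc : c = 'c'
      · subst hc
        by_cases h3 : y = 'h' ∧ (x = 'f' ∨ x = 'k' ∨ x = 'p' ∨ x = 't')
        · obtain ⟨hy, hx4⟩ := h3
          subst hy
          rcases hx4 with hx | hx | hx | hx <;> subst hx
          · have hf : pvClusters.find? (fun cl => cl.isPrefixOf ('c' :: 'f' :: 'h' :: rest)) = some ['c', 'f', 'h'] := by
              simp [pvClusters, List.isPrefixOf]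
            rw [pvAGo_cons, hf]
            simp [pvBGo, ih3]
          · have hf : pvClusters.find? (fun cl => cl.isPrefixOf ('c' :: 'k' :: 'h' :: rest)) = some ['c', 'k', 'h'] := by
              simp [pvClusters, List.isPrefixOf]
            rw [pvAGo_cons, hf]
            simp [pvBGo, ih3]
          · have hf : pvClusters.find? (fun cl => cl.isPrefixOf ('c' :: 'p' :: 'h' :: rest)) = some ['c', 'p', 'h'] := by
              simp [pvClusters, List.isPrefixOf]
            rw [pvAGo_cons, hf]
            simp [pvBGo, ih3]
          · have hf : pvClusters.find? (fun cl => cl.isPrefixOf ('c' :: 't' :: 'h' :: rest)) = some ['c', 't', 'h'] := by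
              simp [pvClusters, List.isPrefixOf]
            rw [pvAGo_cons, hf]
            simp [pvBGo, ih3]
        · by_cases hxh : x = 'h'
          · subst hxh
            have hf : pvClusters.find? (fun cl => cl.isPrefixOf ('c' :: 'h' :: y :: rest)) = some ['c', 'h'] := by
              simp [pvClusters, List.isPrefixOf]
            rw [pvAGo_cons, hf]
            simp [pvBGo]
            exact ih2
          · have hf : pvClusters.find? (fun cl => cl.isPrefixOf ('c' :: x :: y :: rest)) = none := by
              by_cases hy : y = 'h'
              · subst hy
                have hx4 : ¬(x = 'f' ∨ x = 'k' ∨ x = 'p' ∨ x = 't') := fun hh => h3 ⟨rfl, hh⟩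
                simp only [not_or] at hx4
                obtain ⟨e1, e2, e3, e4⟩ := hx4
                simp [pvClusters, List.isPrefixOf, beqF hxh, beqF e1, beqF e2, beqF e3, beqF e4]
              · simp [pvClusters, List.isPrefixOf, beqF hxh, beqF hy]
            rw [pvAGo_cons, hf]
            simp [pvBGo, hxh, h3, ih1]
      · by_cases hs : c = 's'
        · subst hs
          by_cases hxh : x = 'h'
          · subst hxh
            have hf : pvClusters.find? (fun cl => cl.isPrefixOf ('s' :: 'h' :: y :: rest)) = some ['s', 'h'] := by
              simp [pvClusters, List.isPrefixOf]
            rw [pvAGo_cons, hf]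
            simp [pvBGo]
            exact ih2
          · have hf : pvClusters.find? (fun cl => cl.isPrefixOf ('s' :: x :: y :: rest)) = none := by
              simp [pvClusters, List.isPrefixOf, beqF hxh]
            rw [pvAGo_cons, hf]
            simp [pvBGo, hxh]
            exact ih1
        · have hf : pvClusters.find? (fun cl => cl.isPrefixOf (c :: x :: y :: rest)) = none := by
            simp [pvClusters, List.isPrefixOf, beqF hc, beqF hs]
          rw [pvAGo_cons, hf]
          simp [pvBGo, hc, hs]
          exact ih1
termination_by cs => cs.length

-- ===== VERDICT (by name: the statement is the Claim_ definition above) =====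
theorem parse_into_glyphs_spec : Claim_equal_parse_into_glyphs := by
  intro text _
  unfold Spec_parse_into_glyphs parse_into_glyphs parse_into_glyphs_alt
  exact go_eq text.toList
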